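/- GENERATED by mk_final_copies.py from the proof of the farm's unit `start_decoder.R2` (farm:start_decoder.R2.2: Lemmas.lean) as the
   re-elaboration sweep compiled it — do not edit. -/
import Asan.CheckWalk
import Vorbis.Spec.StartDecoderBTest
import Vorbis.Spec.ReaderLemmas
import Vorbis.Spec.Units.start_decoder_R2

open X86 X86.User Asan Vorbis Vorbis.Spec Vorbis.Spec.StartDecoder

set_option maxRecDepth 4000
set_option maxHeartbeats 4000000

namespace Vorbis.Spec.start_decoder_R2

/-! ### Pure lemmas of segment `start_decoder.R2` (no machine walk here) -/

/-- A spill slot of the frame, `[R + k]` with `R = RA − 1480`, as the word the walker computes from the entry stack pointer. -/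
theorem slot_addr (w : Word) (k : Nat) (hk : k ≤ 1480) (hw : 1480 ≤ w.toNat) :
    addr (w.toNat - 1480 + k) = w - UInt64.ofNat (1480 - k) := by
  have h1 : addr w.toNat - UInt64.ofNat (1480 - k) = addr (w.toNat - (1480 - k)) :=
    (UInt64.ofNat_sub (by omega)).symm
  rw [addr_toNat] at h1
  rw [h1]
  congr 1
  omega

/-- **Where `*f` is**: a live object of the callers (`Hand.obj`), so above the text, inside the data space, and off start_decoder's
own stack `[RA − 1888, RA + 8)`: a stack object of a caller's protected frame lies above the return-address slot
(`Frame.callers`), every other object is off the stack region. -/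
theorem obj_where {u₀ : State} {g : Ghost} {pc : Word} {A : Arena × List Obj} {v : State} (hfr : Frame u₀ g pc A v)
    (hh : g.Hand A) :
    0x119d40 ≤ g.f ∧ g.f + 1808 ≤ 0xC00000 ∧ (g.RA + 8 ≤ g.f ∨ g.f + 1808 ≤ 0x700000 ∨ 0x800000 ≤ g.f) := by
  have hobj : LiveIn A.2 g.frames' g.f Off.sizeof.stb_vorbis := hh.obj.mono (frames'_sub g A.2)
  have hw := hobj.where_ hfr.shadow hfr.offText (by decide)
  simp only [Off.sizeof.stb_vorbis] at hw
  refine ⟨hw.1, hw.2.1, ?_⟩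
  obtain ⟨o, ho, k1, k2⟩ := hh.obj
  simp only [Off.sizeof.stb_vorbis] at k2
  rcases List.mem_append.mp ho with hs | hoth
  · left
    have hst : StackOK v.mem g.R g.frames' := hfr.shadow.stack
    have hs' : o ∈ stackObjs g.frames' := by
      unfold Ghost.frames'
      rw [stackObjs_cons]
      exact List.mem_append_right _ hs
    -- the object lies in one of the CALLERS' frames
    unfold stackObjs at hs
    obtain ⟨bF, hbF, hin⟩ := List.mem_flatMap.mp hs
    have hbF' : bF ∈ g.frames' := List.mem_cons_of_mem _ hbF
    obtain ⟨a1, a2, _, _, _⟩ := hst.active bF hbF'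
    have hgr := FrameLayout.objsAt_gran a1 a2 hin
    have hc := hfr.callers bF hbF
    have e : o.gLo = o.base / 8 := rfl
    omega
  · right
    have hoff := hfr.shadow.off o hoth
    unfold OffStack at hoff
    omega

/-- **SD.7 from the invariant of loop 4043 at `i = residue_count`** (same memory): RES(rc) is `ResidueOK`, and the record is
re-instantiated to the current arena (`Own.mono`): the blocks allocated from now on are younger than all of it. -/
theorem mid7 {g : Ghost} {A6 A6c : Arena} {A : Arena × List Obj} {mem : Mem} {i : Nat}
    (h : Mid g 6 6 7 A6 A mem) (hres : ResTrans A6 A6c A.1 A.1 mem g.f i)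
    (hi : (i : Int) = stb_vorbis.residue_count mem g.f) : Mid g 7 6 7 A.1 A mem := by
  have hown : Own 6 A.1.Blk mem g.f := h.own.mono (fun B hB => hB.mono h.extc)
  have hrok : ResidueOK A.1.Blk mem g.f := hres.upTo.toOK hi
  refine ⟨h.env, h.consts, h.arena, h.noTemps, Arena.Extends.refl _, h.bits, h.first, h.discard0, h.header, ?_, ?_, ?_, h.rest⟩
  · exact ⟨fun h2 => hown.comment (by omega), fun h3 => hown.cb0 (by omega), fun h3 => hown.nonnull (by omega),
      fun h5 => hown.books (by omega), fun h6 => hown.floor (by omega), fun _ => hrok, fun h8 => absurd h8 (by omega)⟩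
  · intro _ _
    exact h.lfl (by omega) (by omega)
  · intro h9
    exact absurd h9 (by omega)

/-- **`Mid` OVER A STEP OF THE SEGMENT** (a copy of `Mid.frame`'s proof, generalised so that it also crosses a successful
`setup_malloc`: the ghost arena may grow from `A` to `A'`, the zero rest may shrink, the frame constants may be those of a later
point): the windows `Mid.winsAt k z'` of `*f` read the same, every block of the configuration arena is kept, the constants and the
slot of `longest_floorlist` are given for the new memory, and so are the environment, the arena layer and `Bits`. -/
theorem mid_move {g : Ghost} {k kc kc' z z' : Nat} {Ac : Arena} {A A' : Arena × List Obj} {mem mem' : Mem}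
    (h : Mid g k kc z Ac A mem) (hz : restFrom z ≤ restFrom z')
    (he : ObjEq (Mid.winsAt k z') mem g.f mem' g.f) (hk : ∀ B, Ac.Blk B → B.Kept mem mem')
    (hconsts : SDFrameConsts kc' mem' g.R) (hslot : 6 ≤ k → k ≤ 9 → mem'.i32 (g.R + 0x28) = mem.i32 (g.R + 0x28))
    (henv : Env (g.Blk A') (g.Live A') mem') (harena : ArenaOK A'.1 A'.2 mem' g.f) (hno : A'.1.temps = [])
    (hext : A.1.Extends A'.1) (hbits : Bits (g.Blk A') g.len mem' g.f) : Mid g k kc' z' Ac A' mem' := by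
  have hge := Mid.hi_ge k
  have m0 : ((0, 8) : Nat × Nat) ∈ Mid.winsAt k z' := List.mem_cons_self
  have m1 : ((24, 48) : Nat × Nat) ∈ Mid.winsAt k z' := List.mem_cons_of_mem _ List.mem_cons_self
  have m2 : ((152, Mid.hi k) : Nat × Nat) ∈ Mid.winsAt k z' :=
    List.mem_cons_of_mem _ (List.mem_cons_of_mem _ List.mem_cons_self)
  have m3 : ((restFrom z', 1480) : Nat × Nat) ∈ Mid.winsAt k z' :=
    List.mem_cons_of_mem _ (List.mem_cons_of_mem _ (List.mem_cons_of_mem _ List.mem_cons_self))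
  have m4 : ((1749, 1750) : Nat × Nat) ∈ Mid.winsAt k z' :=
    List.mem_cons_of_mem _ (List.mem_cons_of_mem _ (List.mem_cons_of_mem _ (List.mem_cons_of_mem _ List.mem_cons_self)))
  have m5 : ((1784, 1788) : Nat × Nat) ∈ Mid.winsAt k z' :=
    List.mem_cons_of_mem _ (List.mem_cons_of_mem _ (List.mem_cons_of_mem _ (List.mem_cons_of_mem _
      (List.mem_cons_of_mem _ List.mem_cons_self))))
  have heown : ObjEq (Own.winsAt k) mem g.f mem' g.f := by
    apply he.sub
    intro w hw
    simp only [Own.winsAt, List.mem_cons, List.mem_nil_iff, or_false] at hw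
    rcases hw with rfl | rfl | rfl
    · exact ⟨(0, 8), m0, by simp only []; omega, by simp only []; omega⟩
    · exact ⟨(24, 48), m1, Nat.le_refl _, Nat.le_refl _⟩
    · exact ⟨(152, Mid.hi k), m2, by simp only []; omega, Nat.le_refl _⟩
  have hown := h.own.frame heown hk
  refine ⟨henv, hconsts, harena, hno, h.extc.trans hext, hbits, ?_, ?_, ?_, hown, ?_, ?_, ?_⟩
  · have e : stb_vorbis.first_decode mem' g.f = stb_vorbis.first_decode mem g.f := by
      simp only [vacc, voff]
      exact he.u8 1749 ⟨(1749, 1750), m4, Nat.le_refl _, Nat.le_refl _⟩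
    rw [e]
    exact h.first
  · have e : stb_vorbis.discard_samples_deferred mem' g.f = stb_vorbis.discard_samples_deferred mem g.f := by
      simp only [vacc, voff]
      exact he.i32 1784 ⟨(1784, 1788), m5, Nat.le_refl _, Nat.le_refl _⟩
    rw [e]
    exact h.discard0
  · apply h.header.transfer
    apply he.sub
    intro w hw
    simp only [HeaderOK.wins, List.mem_cons, List.mem_nil_iff, or_false] at hw
    rcases hw with rfl | rfl
    · exact ⟨(0, 8), m0, Nat.le_refl _, Nat.le_refl _⟩
    · exact ⟨(152, Mid.hi k), m2, Nat.le_refl _, by simp only []; omega⟩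
  · -- the slot of longest_floorlist and `values` of every floor
    intro h6 h9
    obtain ⟨h1, h2, h3⟩ := h.lfl h6 h9
    have hb6 := Mid.hi_ge6 h6
    have hfl := h.own.floor h6
    have eslot : mem'.i32 (g.R + 0x28) = mem.i32 (g.R + 0x28) := hslot h6 h9
    have ecount : stb_vorbis.floor_count mem' g.f = stb_vorbis.floor_count mem g.f := by
      simp only [vacc, voff]
      exact he.i32 176 ⟨(152, Mid.hi k), m2, by simp only []; omega, by simp only []; omega⟩
    have ecfg : stb_vorbis.floor_config mem' g.f = stb_vorbis.floor_config mem g.f := by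
      simp only [vacc, voff]
      exact he.u64 312 ⟨(152, Mid.hi k), m2, by simp only []; omega, by simp only []; omega⟩
    have hkept := hk _ hfl.FL2
    refine ⟨by rw [eslot]; exact h1, by rw [eslot]; exact h2, ?_⟩
    intro i hi
    rw [ecount] at hi
    have eat : stb_vorbis.floor_config_at mem' g.f i = stb_vorbis.floor_config_at mem g.f i := by
      simp only [stb_vorbis.floor_config_at]
      rw [ecfg]
    have hcnt := hfl.FL1
    have ev : Floor1.values mem' (stb_vorbis.floor_config_at mem g.f i) = Floor1.values mem (stb_vorbis.floor_config_at mem g.f i) := by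
      simp only [Floor1.values, stb_vorbis.floor_config_at, voff]
      apply hkept.i32
      · simp only [floorBlock, voff]
        omega
      · simp only [floorBlock, voff]
        omega
    rw [eat, ev, eslot]
    exact h3 i hi
  · intro h9
    have hb9 := Mid.hi_ge9 h9
    apply (h.mode h9).transfer
    apply he.sub
    intro w hw
    simp only [ModeOK.wins, List.mem_cons, List.mem_nil_iff, or_false] at hw
    rcases hw with rfl | rfl
    · exact ⟨(152, Mid.hi k), m2, by simp only []; omega, by simp only []; omega⟩
    · exact ⟨(152, Mid.hi k), m2, by simp only []; omega, by simp only []; omega⟩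
  · -- the zero rest, from `restFrom z'` on
    intro o ho1 ho2
    have hzr := h.rest o (by omega) ho2
    simp only [voff] at ho2
    rw [he (restFrom z', 1480) m3 o ho1 ho2]
    exact hzr

/-- **The environment of a check site after a step** (the ghost arena may have grown, the object list got longer): the shadow
covers the new live set (`ShadowInv.covers`), the block predicate is lawful and every block live (`ArenaOK.runBlk_ok / _live`
for the new arena; `*f` and the fixed objects from the old environment). -/
theorem env_grow {g : Ghost} {A A' : Arena × List Obj} {mem mem' : Mem} (henv : Env (g.Blk A) (g.Live A) mem)
    (hh' : g.Hand A') (harena : ArenaOK A'.1 A'.2 mem' g.f) (hsub : ∀ o, o ∈ A.2 → o ∈ A'.2)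
    (hshadow : ShadowInv A'.2 g.frames' g.R mem') : Env (g.Blk A') (g.Live A') mem' := by
  have hx : BlkOK (listBlk (objBlock g.f :: fixedBlocks g.len)) := henv.ok.sub (fun B hB => Or.inr hB)
  have hlive : ∀ x, g.Live A x → g.Live A' x := by
    intro x hx'
    obtain ⟨o, ho, hb⟩ := hx'
    refine ⟨o, ?_, hb⟩
    rcases List.mem_append.mp ho with h1 | h2
    · exact List.mem_append_left _ h1
    · exact List.mem_append_right _ (hsub o h2)
  refine ⟨hshadow.covers, ?_, ?_⟩
  · apply harena.runBlk_ok hx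
    intro C hC
    rcases List.mem_cons.mp hC with rfl | hm
    · exact hh'.objOut
    · exact hh'.outside C hm
  · apply harena.runBlk_live (fun o ho => List.mem_append_right _ ho)
    exact (henv.live.sub (fun B hB => Or.inr hB)).mono hlive

/-- **Where a step of the segment may store**: below the spill slots of the own frame (the callees' frames, the pushed return
addresses: `[RA − 1888, R + 8)`); in a field of `*f` that neither the groups of SD.7 nor the zero rest from `mode_count` on nor
`Bits` nor the arena layer's four fields own (`setup_memory_required`, the bit reader's fields, `mapping_count` / `mapping`,
`error`); in the arena's shadow; inside a block of the arena allocated since the snapshot `A7`. -/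
def SpanOK (g : Ghost) (A7 A' : Arena) (w : Span) : Prop :=
  (g.RA - 1888 ≤ w.lo ∧ w.hi ≤ g.R + 8) ∨
  (g.f + 8 ≤ w.lo ∧ w.hi ≤ g.f + 24) ∨
  (g.f + 48 ≤ w.lo ∧ w.hi ≤ g.f + 152) ∨
  (g.f + 464 ≤ w.lo ∧ w.hi ≤ g.f + 480) ∨
  (g.f + 1480 ≤ w.lo ∧ w.hi ≤ g.f + 1749) ∨
  (g.f + 1750 ≤ w.lo ∧ w.hi ≤ g.f + 1784) ∨
  (0xC00000 + A'.B / 8 ≤ w.lo ∧ w.hi ≤ 0xC00000 + (A'.B + A'.L + 7) / 8) ∨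
  (∃ C, Since A7 A' C ∧ C.base ≤ w.lo ∧ w.hi ≤ C.base + C.size)

/-- **The point inside the second half of the segment** (from SD.7, 0x115997, to the exits): the common part of every cut point,
the hand-over carrier, the groups of SD.7 over the blocks of the snapshot `A7` (the arena at SD.7, before `mapping` is
allocated) with the zero rest from `mode_count` on, and `rbp = f`. -/
structure Pt (u₀ : State) (g : Ghost) (pc : Word) (A7 : Arena) (A : Arena × List Obj) (v : State) : Prop where
  frame : Frame u₀ g pc A v
  hand : g.Hand A
  mid : Mid g 7 6 8 A7 A v.mem
  rbp : v.reg .rbp = addr g.f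

/-- The windows of `*f` that `Mid g 7 · 8` reads, as numerals. -/
theorem winsAt78 : Mid.winsAt 7 8 = [(0, 8), (24, 48), (152, 464), (480, 1480), (1749, 1750), (1784, 1788)] := by
  decide

/-- **THE POINT OVER A STEP OF THE SEGMENT**: from the point at `v` (ghost `A`) to the point at `v'` (ghost `A'`, the same or
grown by one allocation), when the memory changed only on spans that are `SpanOK`. Given for the new state: the registers, the
code span, `abiInv`, the shadow layer, the arena layer and `Bits` (each step has them from the callee's post or by its own frame
lemma). Everything else — the saved registers, the shadow index, `log2_4`, the function's footprint, the groups of SD.7, the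
frame constants, the zero rest — is carried here. -/
theorem Pt.move {u₀ : State} {g : Ghost} {pc pc' : Word} {A7 : Arena} {A A' : Arena × List Obj} {v v' : State}
    (h : Pt u₀ g pc A7 A v) {spans : List Span} (hs : Mem.SameExcept spans v.mem v'.mem)
    (hcl : ∀ w, w ∈ spans → SpanOK g A7 A'.1 w)
    (hrip : v'.rip = pc') (hrsp : v'.reg .rsp = addr g.R) (hrbp : v'.reg .rbp = addr g.f)
    (hcode : CodeOK u₀ v'.mem) (hinv : abiInv v') (hshadow : ShadowInv A'.2 g.frames' g.R v'.mem)
    (hoff : ∀ o, o ∈ A'.2 → L.textHi ≤ o.base) (hext : A.1.Extends A'.1) (hsub : ∀ o, o ∈ A.2 → o ∈ A'.2)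
    (harena : ArenaOK A'.1 A'.2 v'.mem g.f) (hno : A'.1.temps = [])
    (hbits : Bits (g.Blk A) g.len v'.mem g.f) : Pt u₀ g pc' A7 A' v' := by
  have hfr := h.frame
  have hR := hfr.r_eq
  have hra := hfr.ra
  simp only [depth, steady] at hR hra
  have hwh := obj_where hfr h.hand
  have hobr := h.mid.bits.OBR
  simp only [Off.sizeof.stb_vorbis] at hobr
  have hh' : g.Hand A' := HandOK.mono h.hand hext hsub
  have hout := hh'.objOut
  simp only [Off.sizeof.stb_vorbis] at hout
  have hab := harena.bounds
  have h1x := harena.AR1x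
  have hext7 : A7.Extends A'.1 := h.mid.extc.trans hext
  have hext0 : g.A0.1.Extends A'.1 := hfr.ext.trans hext
  have hglob : 0x120640 + 16 ≤ A'.1.B ∨ A'.1.B + A'.1.L ≤ 0x120640 := by
    have := hh'.outside ⟨0x120640, 16⟩ (by
      unfold fixedBlocks globalBlocks
      simp only [List.mem_cons, true_or, or_true])
    exact this
  -- every span misses the upper part of the own frame (the spill slots, the protected frame, the saved registers, RA)
  have hup : ∀ w, w ∈ spans → w.hi ≤ g.R + 8 ∨ g.RA + 8 ≤ w.lo := by
    intro w hw
    rcases hcl w hw with c | c | c | c | c | c | c | ⟨C, hC, c1, c2⟩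
    · omega
    · omega
    · omega
    · omega
    · omega
    · omega
    · omega
    · have hin := arena_inside harena hC.1
      omega
  -- every span misses the global `log2_4`
  have hlog : ∀ w, w ∈ spans → w.hi ≤ 0x120640 ∨ 0x120640 + 16 ≤ w.lo := by
    intro w hw
    rcases hcl w hw with c | c | c | c | c | c | c | ⟨C, hC, c1, c2⟩
    · omega
    · omega
    · omega
    · omega
    · omega
    · omega
    · omega
    · have hin := arena_inside harena hC.1
      omega
  -- every span misses the windows of `*f` that the point reads
  have hobj : ∀ w, w ∈ Mid.winsAt 7 8 → ∀ s, s ∈ spans → g.f + w.2 ≤ s.lo ∨ s.hi ≤ g.f + w.1 := by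
    intro w hw s hsp
    rw [winsAt78] at hw
    simp only [List.mem_cons, List.mem_nil_iff, or_false] at hw
    rcases hcl s hsp with c | c | c | c | c | c | c | ⟨C, hC, c1, c2⟩
    · rcases hw with rfl | rfl | rfl | rfl | rfl | rfl <;> simp only [] <;> omega
    · rcases hw with rfl | rfl | rfl | rfl | rfl | rfl <;> simp only [] <;> omega
    · rcases hw with rfl | rfl | rfl | rfl | rfl | rfl <;> simp only [] <;> omega
    · rcases hw with rfl | rfl | rfl | rfl | rfl | rfl <;> simp only [] <;> omega
    · rcases hw with rfl | rfl | rfl | rfl | rfl | rfl <;> simp only [] <;> omega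
    · rcases hw with rfl | rfl | rfl | rfl | rfl | rfl <;> simp only [] <;> omega
    · rcases hw with rfl | rfl | rfl | rfl | rfl | rfl <;> simp only [] <;> omega
    · have hin := arena_inside harena hC.1
      rcases hw with rfl | rfl | rfl | rfl | rfl | rfl <;> simp only [] <;> omega
  -- every span misses every block of the snapshot `A7`
  have hold : ∀ B, A7.Blk B → ∀ w, w ∈ spans → B.base + B.size ≤ w.lo ∨ w.hi ≤ B.base := by
    intro B hB w hw
    have hB' : A'.1.Blk B := hB.mono hext7
    have hin := arena_inside harena hB'
    rcases hcl w hw with c | c | c | c | c | c | c | ⟨C, hC, c1, c2⟩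
    · omega
    · omega
    · omega
    · omega
    · omega
    · omega
    · omega
    · have hd := harena.old_disjoint_since hext7 hB hC
      simp only [vblock] at hd
      omega
  -- every span lies inside the function's footprint
  have hfp : ∀ w, w ∈ spans → ∀ a : Nat, w.lo ≤ a → a < w.hi → ∃ w', w' ∈ footprint g ∧ w'.lo ≤ a ∧ a < w'.hi := by
    intro w hw a a1 a2
    have ef : (g.e.reg .rdi).toNat = g.f := rfl
    have eB := hext0.B
    have eL := hext0.L
    unfold footprint writes
    rcases hcl w hw with c | c | c | c | c | c | c | ⟨C, hC, c1, c2⟩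
    · refine ⟨_, List.mem_cons_self, ?_, ?_⟩
      · simp only [depth]
        omega
      · simp only []
        omega
    · refine ⟨_, List.mem_cons_of_mem _ List.mem_cons_self, ?_, ?_⟩ <;> simp only [vblock, voff, ef] <;> omega
    · refine ⟨_, List.mem_cons_of_mem _ List.mem_cons_self, ?_, ?_⟩ <;> simp only [vblock, voff, ef] <;> omega
    · refine ⟨_, List.mem_cons_of_mem _ List.mem_cons_self, ?_, ?_⟩ <;> simp only [vblock, voff, ef] <;> omega
    · refine ⟨_, List.mem_cons_of_mem _ List.mem_cons_self, ?_, ?_⟩ <;> simp only [vblock, voff, ef] <;> omega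
    · refine ⟨_, List.mem_cons_of_mem _ List.mem_cons_self, ?_, ?_⟩ <;> simp only [vblock, voff, ef] <;> omega
    · refine ⟨_, List.mem_cons_of_mem _ (List.mem_cons_of_mem _ (List.mem_cons_of_mem _ (List.mem_cons_of_mem _
        List.mem_cons_self))), ?_, ?_⟩ <;> simp only [shadowSpan] <;> omega
    · have hin := arena_inside harena hC.1
      refine ⟨_, List.mem_cons_of_mem _ (List.mem_cons_of_mem _ (List.mem_cons_of_mem _ List.mem_cons_self)), ?_, ?_⟩ <;>
        simp only [] <;> omega
  -- the upper part of the frame reads the same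
  have hupper : Mem.EqOn (g.R + 8) (g.RA + 8) v.mem v'.mem := by
    apply hs.eqOn
    intro w hw
    have := hup w hw
    omega
  have hb : g.RA + 8 ≤ 2 ^ 64 := by omega
  have hsh7 : Log2_4In v'.mem := by
    intro i hi
    have hlg : Mem.EqOn 0x120640 (0x120640 + 16) v.mem v'.mem := by
      apply hs.eqOn
      intro w hw
      have := hlog w hw
      omega
    have e := hlg.readLE_addr (0x120640 + i) 1 (by omega) (by omega) (by omega)
    have h0 := hfr.sh7 i hi
    have eb : Vorbis.Globals.log2_4.beg = 0x120640 := rfl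
    rw [eb] at h0 ⊢
    exact e.trans h0
  have hframe : Frame u₀ g pc' A' v' := by
    refine ⟨hfr.entry, hrip, hrsp, ?_, ?_, ?_, ?_, ?_, ?_, ?_, ?_, hcode, hinv, hshadow, hoff, hext0, hfr.callers, hsh7, ?_⟩
    · rw [hupper.u64 (g.R + 8) (by omega) (by omega) hb]
      exact hfr.shadowIdx
    · rw [hupper.u64 (g.R + 0x598) (by omega) (by omega) hb]
      exact hfr.saved_rbx
    · rw [hupper.u64 (g.R + 0x5a0) (by omega) (by omega) hb]
      exact hfr.saved_rbp
    · rw [hupper.u64 (g.R + 0x5a8) (by omega) (by omega) hb]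
      exact hfr.saved_r12
    · rw [hupper.u64 (g.R + 0x5b0) (by omega) (by omega) hb]
      exact hfr.saved_r13
    · rw [hupper.u64 (g.R + 0x5b8) (by omega) (by omega) hb]
      exact hfr.saved_r14
    · rw [hupper.u64 (g.R + 0x5c0) (by omega) (by omega) hb]
      exact hfr.saved_r15
    · rw [hupper.u64 (g.R + 0x5c8) (by omega) (by omega) hb]
      exact hfr.saved_ra
    · exact hfr.same.trans (hs.mono (fun w hw a a1 a2 => hfp w hw a a1 a2))
  have henv : Env (g.Blk A') (g.Live A') v'.mem := env_grow h.mid.env hh' harena hsub hshadow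
  have hbits' : Bits (g.Blk A') g.len v'.mem g.f :=
    hbits.reblk (runBlk_extra List.mem_cons_self) (runBlk_extra (List.mem_cons_of_mem _ (fixed_in g.len)))
  have hmid : Mid g 7 6 8 A7 A' v'.mem := by
    apply mid_move h.mid (Nat.le_refl _) ?_ ?_ ?_ ?_ henv harena hno hext hbits'
    · apply ObjEq.of_sameExcept hs
      · intro w hw
        rw [winsAt78] at hw
        simp only [List.mem_cons, List.mem_nil_iff, or_false] at hw
        rcases hw with rfl | rfl | rfl | rfl | rfl | rfl <;> simp only [] <;> omega
      · exact hobj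
    · exact AllKept.of_sameExcept (harena.blkOK.sub (fun B hB => hB.mono hext7)) hs hold
    · apply h.mid.consts.frame (hupper.mono (Nat.le_refl _) (by omega))
      omega
    · intro _ _
      exact hupper.i32 (g.R + 0x28) (by omega) (by omega) hb
  exact ⟨hframe, hh', hmid, hrbp⟩

/-- **Every block whose content RES(i) reads is a block of the current arena**: `residue_config`, the blocks of the finished
records, and CB0's codebooks block (given). The `hk` of `resTrans_frame` from `AllKept A.Blk`. -/
theorem resTrans_reads_blk {A6 A6c Ai A : Arena} {mem : Mem} {f i : Nat} (h : ResTrans A6 A6c Ai A mem f i)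
    (hcb : A.Blk ⟨stb_vorbis.codebooks mem f, Off.sizeof.Codebook * (stb_vorbis.codebook_count mem f).toNat⟩)
    (B : Block) (hR : ResidueUpTo.Reads mem f i B) : A.Blk B := by
  cases hR with
  | codebooks => exact hcb
  | owns hO =>
    cases hO with
    | config => exact (h.R2.1.mono h.ext6c).mono h.exti
    | record i' hi' B hB =>
      have hrec := h.record i' hi'
      cases hB with
      | books => exact hrec.R8.1.mono h.exti
      | classdata => exact hrec.R8a.1.mono h.exti
      | row q hq => exact (hrec.R8a_row q hq).1.mono h.exti

/-- **FRAME of RES(i) with the ages of its blocks** (the analogue of S4's `BookTrans.frame`, which S5's file lacks): the windows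
of the residue group read the same and every block the transient reads is kept. -/
theorem resTrans_frame {A6 A6c Ai A : Arena} {mem mem' : Mem} {f i : Nat} (h : ResTrans A6 A6c Ai A mem f i)
    (he : ObjEq ResidueOK.wins mem f mem' f) (hk : ∀ B, ResidueUpTo.Reads mem f i B → B.Kept mem mem') :
    ResTrans A6 A6c Ai A mem' f i := by
  have h1 := h.R1
  have hle := h.n_le
  have hi64 : i ≤ 64 := by omega
  have hu : ResidueUpTo A.Blk mem' f i := h.upTo.transfer he hk (fun _ _ hb => hb)
  have ecount : stb_vorbis.residue_count mem' f = stb_vorbis.residue_count mem f := by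
    simp only [vacc, voff]
    exact he.i32 320 (by decide)
  have econf : stb_vorbis.residue_config mem' f = stb_vorbis.residue_config mem f := by
    simp only [vacc, voff]
    exact he.u64 456 (by decide)
  have eat : ∀ j, stb_vorbis.residue_config_at mem' f j = stb_vorbis.residue_config_at mem f j := by
    intro j
    unfold stb_vorbis.residue_config_at
    rw [econf]
  have hconf := hk _ (ResidueUpTo.Reads.owns ResidueUpTo.Owns.config)
  have hcb := hk _ ResidueUpTo.Reads.codebooks
  refine ⟨h.ext6, h.ext6c, h.exti, hu.n_le, hu.R1, ?_, hu.R3, ?_⟩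
  · rw [ecount, econf]
    exact h.R2
  · intro j hj
    rw [eat j]
    have hrec := h.record j hj
    have h7 := hrec.R7
    have hr : (Block.mk (stb_vorbis.residue_config_at mem f j) Off.sizeof.Residue).Kept mem mem' := by
      apply hconf.mono
      · simp only [vacc, voff]
        omega
      · simp only [vacc, voff] at h1 hle ⊢
        omega
    have hcbk : (Block.mk (Residue.cbk mem f (stb_vorbis.residue_config_at mem f j)) 8).Kept mem mem' := by
      apply hcb.mono
      · simp only [vacc, voff]
        omega
      · simp only [vacc, voff] at h7 ⊢
        omega
    have hrd := ResidueReads.of_kept ((he.sub (ResidueUpTo.wins_sub hi64)).sub (ResidueUpTo.wins_sub_at i)) hr hcbk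
    apply hrec.frame hrd
    · intro B hO
      exact hk B (ResidueUpTo.Reads.owns (ResidueUpTo.Owns.record j hj B hO))
    · intro B _ hb
      exact hb

/-- **FRAME of the zero part of RES(i)**: `residue_count`, `residue_config` read the same and the `residue_config` block is kept. -/
theorem zero_frame {mem mem' : Mem} {f n : Nat} (h : ResidueZeroFrom mem f n)
    (hR1 : 1 ≤ stb_vorbis.residue_count mem f ∧ stb_vorbis.residue_count mem f ≤ 64)
    (he : ObjEq ResidueOK.wins mem f mem' f)
    (hconf : (Block.mk (stb_vorbis.residue_config mem f) (Off.sizeof.Residue * (stb_vorbis.residue_count mem f).toNat)).Kept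
      mem mem') : ResidueZeroFrom mem' f n := by
  have ecount : stb_vorbis.residue_count mem' f = stb_vorbis.residue_count mem f := by
    simp only [vacc, voff]
    exact he.i32 320 (by decide)
  have econf : stb_vorbis.residue_config mem' f = stb_vorbis.residue_config mem f := by
    simp only [vacc, voff]
    exact he.u64 456 (by decide)
  intro j hj hlt
  rw [ecount] at hlt
  have e : stb_vorbis.residue_config_at mem' f j = stb_vorbis.residue_config_at mem f j := by
    unfold stb_vorbis.residue_config_at
    rw [econf]
  rw [e]
  have h0 := h j hj hlt
  have ek : Residue.classdata mem' (stb_vorbis.residue_config_at mem f j)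
      = Residue.classdata mem (stb_vorbis.residue_config_at mem f j) := by
    simp only [vacc, voff]
    apply hconf.u64
    · simp only [vacc, voff] at hR1 hlt ⊢
      omega
    · simp only [vacc, voff] at hR1 hlt ⊢
      omega
  rw [ek]
  exact h0

/-- **The common part of a cut point over a step**: the upper part of the own frame (`[R + 8, RA + 8)`: the shadow index, the
protected frame, the saved registers, the return address) and the global `log2_4` read the same, the stores lie inside the
function's footprint; the registers, the code span, `abiInv` and the shadow layer are given for the new state. -/
theorem frame_move {u₀ : State} {g : Ghost} {pc pc' : Word} {A A' : Arena × List Obj} {v v' : State}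
    (hfr : Frame u₀ g pc A v) (hidx : Mem.EqOn (g.R + 8) (g.R + 16) v.mem v'.mem)
    (hupper : Mem.EqOn (g.R + 0x598) (g.RA + 8) v.mem v'.mem)
    (hlg : Mem.EqOn 0x120640 (0x120640 + 16) v.mem v'.mem) (hsame : Mem.SameExcept (footprint g) g.e.mem v'.mem)
    (hrip : v'.rip = pc') (hrsp : v'.reg .rsp = addr g.R) (hcode : CodeOK u₀ v'.mem) (hinv : abiInv v')
    (hshadow : ShadowInv A'.2 g.frames' g.R v'.mem) (hoff : ∀ o, o ∈ A'.2 → L.textHi ≤ o.base)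
    (hext : A.1.Extends A'.1) : Frame u₀ g pc' A' v' := by
  have hR := hfr.r_eq
  have hra := hfr.ra
  simp only [depth, steady] at hR hra
  have hb : g.RA + 8 ≤ 2 ^ 64 := by omega
  have hsh7 : Log2_4In v'.mem := by
    intro i hi
    have e := hlg.readLE_addr (0x120640 + i) 1 (by omega) (by omega) (by omega)
    have h0 := hfr.sh7 i hi
    have eb : Vorbis.Globals.log2_4.beg = 0x120640 := rfl
    rw [eb] at h0 ⊢
    exact e.trans h0
  refine ⟨hfr.entry, hrip, hrsp, ?_, ?_, ?_, ?_, ?_, ?_, ?_, ?_, hcode, hinv, hshadow, hoff, hfr.ext.trans hext,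
    hfr.callers, hsh7, hsame⟩
  · rw [hidx.u64 (g.R + 8) (by omega) (by omega) (by omega)]
    exact hfr.shadowIdx
  · rw [hupper.u64 (g.R + 0x598) (by omega) (by omega) hb]
    exact hfr.saved_rbx
  · rw [hupper.u64 (g.R + 0x5a0) (by omega) (by omega) hb]
    exact hfr.saved_rbp
  · rw [hupper.u64 (g.R + 0x5a8) (by omega) (by omega) hb]
    exact hfr.saved_r12
  · rw [hupper.u64 (g.R + 0x5b0) (by omega) (by omega) hb]
    exact hfr.saved_r13
  · rw [hupper.u64 (g.R + 0x5b8) (by omega) (by omega) hb]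
    exact hfr.saved_r14
  · rw [hupper.u64 (g.R + 0x5c0) (by omega) (by omega) hb]
    exact hfr.saved_r15
  · rw [hupper.u64 (g.R + 0x5c8) (by omega) (by omega) hb]
    exact hfr.saved_ra

/-- **THE EXIT TO R3** (0x1159f8, `i < residue_count`): the loop's invariant at a state whose memory differs from the entry's only
below the stack pointer (the pushed return address of the check call). -/
theorem r3_exit {u₀ : State} {g : Ghost} {i : Nat} {A6 A6c : Arena} {A : Arena × List Obj} {v s : State}
    (hat : BodyR2 u₀ g i A6 A6c A v) (hs : Mem.SameExcept [⟨g.RA - 1888, g.R⟩] v.mem s.mem)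
    (hrip : s.rip = pc_R3) (hrsp : s.reg .rsp = addr g.R) (hrbp : s.reg .rbp = addr g.f) (hr14 : s.reg .r14 = addr i)
    (hcode : CodeOK u₀ s.mem) (hinv : abiInv s) (hlt : (i : Int) < stb_vorbis.residue_count v.mem g.f) :
    AtR3 u₀ g i s := by
  have hl := hat.loop
  have hfr := hl.frame
  have hR := hfr.r_eq
  have hra := hfr.ra
  simp only [depth, steady] at hR hra
  have hwh := obj_where hfr hl.hand
  have hobr := hl.mid.bits.OBR
  simp only [Off.sizeof.stb_vorbis] at hobr
  have harena := hl.mid.arena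
  -- the one span misses `*f`, every block of the arena, the shadow, the globals, the upper part of the frame
  have hobjall : ∀ ws : Wins, WinsBelow ws 1808 → ObjEq ws v.mem g.f s.mem g.f := by
    intro ws hws
    apply ObjEq.of_sameExcept hs
    · intro w hw
      have := hws w hw
      omega
    · intro w hw sp hsp
      have e : sp = ⟨g.RA - 1888, g.R⟩ := List.mem_singleton.mp hsp
      subst e
      have := hws w hw
      simp only []
      omega
  have hkept : AllKept A.1.Blk v.mem s.mem := by
    apply harena.allKept_of_stack hs
    intro w hw
    have e : w = ⟨g.RA - 1888, g.R⟩ := List.mem_singleton.mp hw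
    subst e
    simp only []
    omega
  have hsh : Mem.EqOn 0xC00000 0xE00000 v.mem s.mem := by
    apply hs.eqOn
    intro w hw
    have e : w = ⟨g.RA - 1888, g.R⟩ := List.mem_singleton.mp hw
    subst e
    simp only []
    omega
  have hupper : Mem.EqOn (g.R + 8) (g.RA + 8) v.mem s.mem := by
    apply hs.eqOn
    intro w hw
    have e : w = ⟨g.RA - 1888, g.R⟩ := List.mem_singleton.mp hw
    subst e
    simp only []
    omega
  have hlg : Mem.EqOn 0x120640 (0x120640 + 16) v.mem s.mem := by
    apply hs.eqOn
    intro w hw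
    have e : w = ⟨g.RA - 1888, g.R⟩ := List.mem_singleton.mp hw
    subst e
    simp only []
    omega
  have hsame : Mem.SameExcept (footprint g) g.e.mem s.mem := by
    apply hfr.same.trans
    apply hs.mono
    intro w hw a a1 a2
    have e : w = ⟨g.RA - 1888, g.R⟩ := List.mem_singleton.mp hw
    subst e
    unfold footprint
    refine ⟨_, List.mem_cons_self, ?_, ?_⟩
    · simp only [depth]
      exact a1
    · simp only [] at a2 ⊢
      omega
  have hframe : Frame u₀ g pc_R3 A s :=
    frame_move hfr (hupper.mono (Nat.le_refl _) (by omega)) (hupper.mono (by omega) (Nat.le_refl _)) hlg hsame hrip hrsp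
      hcode hinv (hfr.shadow.untouched hsh) hfr.offText (Arena.Extends.refl _)
  have hb : g.RA + 8 ≤ 2 ^ 64 := by omega
  have harena' : ArenaOK A.1 A.2 s.mem g.f := by
    apply harena.frame (by simp only [Off.sizeof.stb_vorbis]; omega)
    apply hs.eqOn
    intro w hw
    have e : w = ⟨g.RA - 1888, g.R⟩ := List.mem_singleton.mp hw
    subst e
    simp only [voff]
    omega
  have hbits' : Bits (g.Blk A) g.len s.mem g.f :=
    (Vorbis.Spec.Reader.reader_of_window hl.mid.bits hs (by omega)).1
  have hmid : Mid g 6 6 7 A6 A s.mem := by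
    apply hl.mid.frame (hobjall _ ?_) ?_ ?_ ?_ hsh harena' hbits'
    · intro w hw
      have hhi := Mid.hi_le 6
      simp only [Mid.winsAt, List.mem_cons, List.mem_nil_iff, or_false] at hw
      rcases hw with rfl | rfl | rfl | rfl | rfl | rfl <;> simp only [] <;> omega
    · intro B hB
      exact hkept B (hB.mono hl.mid.extc)
    · apply hl.mid.consts.frame (hupper.mono (Nat.le_refl _) (by omega))
      omega
    · intro _ _
      exact hupper.i32 (g.R + 0x28) (by omega) (by omega) hb
  have hres := hl.res
  have heres : ObjEq ResidueOK.wins v.mem g.f s.mem g.f := hobjall _ (by decide)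
  have hcbblk : A.1.Blk ⟨stb_vorbis.codebooks v.mem g.f, Off.sizeof.Codebook * (stb_vorbis.codebook_count v.mem g.f).toNat⟩ :=
    ((hl.mid.own.cb0 (by omega)).ok (hl.mid.own.nonnull (by omega))).F2.mono hl.mid.extc
  have hreads : ∀ B, ResidueUpTo.Reads v.mem g.f i B → B.Kept v.mem s.mem :=
    fun B hB => hkept B (resTrans_reads_blk hres hcbblk B hB)
  have hres' : ResTrans A6 A6c A.1 A.1 s.mem g.f i := resTrans_frame hres heres hreads
  have hzero' : ResidueZeroFrom s.mem g.f i :=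
    zero_frame hl.zero hres.R1 heres (hreads _ (ResidueUpTo.Reads.owns ResidueUpTo.Owns.config))
  have ecount : stb_vorbis.residue_count s.mem g.f = stb_vorbis.residue_count v.mem g.f := by
    simp only [vacc, voff]
    exact heres.i32 320 (by decide)
  refine ⟨A6, A6c, A, ⟨hframe, hl.hand, hmid, ?_, hres', hzero'⟩, hrbp, hr14, ?_⟩
  · rw [ecount]
    exact hl.i_le
  · rw [ecount]
    exact hlt

/-- **A check site on a field of `*f`** (`[f + off, f + off + n)`, OB1): the `check_<addr>` goal of the four check calls of the
segment. `hun`: no store since the cut point `v` went to the shadow; `hb`: the checked address as a number. -/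
theorem check_field {u₀ : State} {g : Ghost} {pc : Word} {A : Arena × List Obj} {k kc z : Nat} {Ac : Arena} {v : State}
    (hfr : Frame u₀ g pc A v) (hm : Mid g k kc z Ac A v.mem) {mem' : Mem} (hun : ShadowUntouched v.mem mem')
    (off n : Nat) (ho : off + n ≤ 1808) (hn : 1 ≤ n) {b : Word} (hb : b = addr (g.f + off)) : AccSmall n mem' b := by
  have hobr := hm.bits.OBR
  simp only [Off.sizeof.stb_vorbis] at hobr
  apply Vorbis.Spec.check_site hfr.shadow hun (hm.bits.site_field hm.env.live off n ho hn rfl)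
  rw [hb]
  exact toNat_addr _ (by omega)

/-- The zero rest from `mode_count` on is part of the zero rest from `mapping_count` on. -/
theorem mid78 {g : Ghost} {Ac : Arena} {A : Arena × List Obj} {mem : Mem} (m : Mid g 7 6 7 Ac A mem) : Mid g 7 6 8 Ac A mem := by
  refine ⟨m.env, m.consts, m.arena, m.noTemps, m.extc, m.bits, m.first, m.discard0, m.header, m.own, m.lfl, m.mode, ?_⟩
  have hr := m.rest
  unfold RestZero at hr ⊢
  exact hr.mono (by decide) (Nat.le_refl _)

/-- **SD.7 at the head of loop 4043 with `i = residue_count`**: the point from which the second half of the segment starts. -/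
theorem pt_start {u₀ : State} {g : Ghost} {i : Nat} {A6 A6c : Arena} {A : Arena × List Obj} {v : State}
    (hat : BodyR2 u₀ g i A6 A6c A v) (hi : (i : Int) = stb_vorbis.residue_count v.mem g.f) :
    Pt u₀ g pc_R2 A.1 A v :=
  ⟨hat.loop.frame, hat.loop.hand, mid78 (mid7 hat.loop.mid hat.loop.res hi), hat.rbp⟩

/-- **Where a step without allocation may store**: below the spill slots of the own frame, or in a field of `*f` that neither the
groups of SD.7, nor the zero rest, nor the arena layer's four fields `[112, 136)` own (the bit reader's fields, `error`,
`mapping_count` / `mapping`). -/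
def SpanLow (g : Ghost) (w : Span) : Prop :=
  (g.RA - 1888 ≤ w.lo ∧ w.hi ≤ g.R + 8) ∨
  (g.f + 8 ≤ w.lo ∧ w.hi ≤ g.f + 24) ∨
  (g.f + 48 ≤ w.lo ∧ w.hi ≤ g.f + 112) ∨
  (g.f + 136 ≤ w.lo ∧ w.hi ≤ g.f + 152) ∨
  (g.f + 464 ≤ w.lo ∧ w.hi ≤ g.f + 480) ∨
  (g.f + 1480 ≤ w.lo ∧ w.hi ≤ g.f + 1749) ∨
  (g.f + 1750 ≤ w.lo ∧ w.hi ≤ g.f + 1784)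

/-- A span below the stack pointer or in a free field of `*f` is `SpanOK` for every arena. -/
theorem SpanLow.ok {g : Ghost} {w : Span} (h : SpanLow g w) (A7 A' : Arena) : SpanOK g A7 A' w := by
  rcases h with c | c | c | c | c | c | c
  · exact Or.inl c
  · exact Or.inr (Or.inl c)
  · exact Or.inr (Or.inr (Or.inl ⟨c.1, by omega⟩))
  · exact Or.inr (Or.inr (Or.inl ⟨by omega, c.2⟩))
  · exact Or.inr (Or.inr (Or.inr (Or.inl c)))
  · exact Or.inr (Or.inr (Or.inr (Or.inr (Or.inl c))))
  · exact Or.inr (Or.inr (Or.inr (Or.inr (Or.inr (Or.inl c)))))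

/-- **The arena layer and the shadow over a step without allocation**: no `SpanLow` span meets the four fields
`[f + 112, f + 136)` of AR5, nor the shadow region. -/
theorem Pt.low_keep {u₀ : State} {g : Ghost} {pc : Word} {A7 : Arena} {A : Arena × List Obj} {v : State} {mem' : Mem}
    (h : Pt u₀ g pc A7 A v) {spans : List Span} (hs : Mem.SameExcept spans v.mem mem')
    (hcl : ∀ w, w ∈ spans → SpanLow g w) : ArenaOK A.1 A.2 mem' g.f ∧ ShadowUntouched v.mem mem' := by
  have hfr := h.frame
  have hR := hfr.r_eq
  have hra := hfr.ra
  simp only [depth, steady] at hR hra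
  have hwh := obj_where hfr h.hand
  have hobr := h.mid.bits.OBR
  simp only [Off.sizeof.stb_vorbis] at hobr
  have harena := h.mid.arena
  constructor
  · apply harena.frame (by simp only [Off.sizeof.stb_vorbis]; omega)
    apply hs.eqOn
    intro w hw
    simp only [voff]
    rcases hcl w hw with c | c | c | c | c | c | c <;> omega
  · apply hs.eqOn
    intro w hw
    rcases hcl w hw with c | c | c | c | c | c | c <;> omega

/-- **The loop test `cmp [f+0x140], r14d ; jg`** (0x11598e, signed): with `r14 = i ≤ 64` it is `i < residue_count`. `x` is the
dword the `cmp` loaded. -/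
theorem br_lt (mem : Mem) (f i : Nat) (hi : i ≤ 64) :
    ((Word.part Width.w32 (addr i)).toInt < (BitVec.ofNat 32 (mem.u32 (f + 320))).toInt) ↔
      (i : Int) < stb_vorbis.residue_count mem f := by
  rw [Vorbis.Spec.Segment.part32_addr i (by omega), toInt_ofNat32 i (by omega), X86.User.Mem.toInt_ofNat32_u32]
  have hc := sint32_cases i
  have e : sint32 i = (i : Int) := by omega
  rw [e]
  simp only [vacc, voff]

/-- The steady stack pointer as the word the walker computes from the entry stack pointer. -/
theorem rsp_eq (w : Word) (hw : 1480 ≤ w.toNat) : addr (w.toNat - 1480) = w - 1480 := by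
  have h := addr_sub_lit w.toNat 1480 hw
  rw [addr_toNat] at h
  exact h.symm

/-- A field of `*f` as the walker spells its address. -/
theorem r2_fld (f k : Nat) : addr f + (no_index (OfNat.ofNat k) : Word) = addr (f + k) := addr_add_lit f k

/-- `lea r13d, [rax + 1]` with `rax = z < 64`: the new `mapping_count`, as a number. -/
theorem mc_val (z : Nat) (hz : z < 64) : (BitVec.setWidth 32 (addr z + 1).toBitVec).toNat = z + 1 := by
  rw [Vorbis.Spec.Segment.setWidth_succ z (by omega), BitVec.toNat_ofNat]
  omega

/-- `imul esi, r13d, 0x38`: the size argument of `setup_malloc`, `56 · mapping_count ≤ 3584` (FIX 8): no 32-bit overflow. -/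
theorem sz_val (z : Nat) (hz : z < 64) :
    (Word.ofBV (BitVec.setWidth 32 (addr z + 1).toBitVec * 56#32)).toNat % 2 ^ 32 = 56 * (z + 1) := by
  rw [Vorbis.Spec.Segment.setWidth_succ z (by omega), Vorbis.toNat_ofBV32, BitVec.toNat_mul, BitVec.toNat_ofNat]
  have e : (56#32).toNat = 56 := rfl
  rw [e]
  omega

/-- **A footprint whose shadow window was not written** (`setup_malloc`'s failure path: its contract lists the shadow of the block it
would have returned, its post says `ShadowUntouched`): the windows inside the shadow region may be dropped. -/
theorem drop_shadow {ws ws' : List Span} {μ ν : Mem} (h : Mem.SameExcept ws' μ ν) (hun : Mem.EqOn 0xC00000 0xE00000 μ ν)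
    (hsub : ∀ w, w ∈ ws' → w ∈ ws ∨ (0xC00000 ≤ w.lo ∧ w.hi ≤ 0xE00000)) : Mem.SameExcept ws μ ν := by
  intro a ha
  by_cases hin : 0xC00000 ≤ a.toNat ∧ a.toNat < 0xE00000
  · exact hun a hin.1 hin.2
  · apply h
    intro w hw
    rcases hsub w hw with h1 | h2
    · exact ha w h1
    · omega

/-- **Where a step that is no reader call may store, seen from `Bits`**: off `*f` altogether, or in `setup_memory_required`
`[8, 12)`, `setup_offset` `[128, 132)`, `error` `[140, 144)`, `mapping_count` / `mapping` `[464, 480)`. -/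
def SpanCfg (f : Nat) (w : Span) : Prop :=
  w.hi ≤ f ∨ f + 1808 ≤ w.lo ∨ (f + 8 ≤ w.lo ∧ w.hi ≤ f + 12) ∨ (f + 128 ≤ w.lo ∧ w.hi ≤ f + 132) ∨
    (f + 140 ≤ w.lo ∧ w.hi ≤ f + 144) ∨ (f + 464 ≤ w.lo ∧ w.hi ≤ f + 480)

/-- `Bits f` over a step that stores into none of the bit reader's fields. -/
theorem bits_keep {Blk : Block → Prop} {len : Nat} {mem mem' : Mem} {f : Nat} (h : Bits Blk len mem f) {spans : List Span}
    (hs : Mem.SameExcept spans mem mem') (hcl : ∀ w, w ∈ spans → SpanCfg f w) : Bits Blk len mem' f := by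
  have hobr := h.OBR
  simp only [Off.sizeof.stb_vorbis] at hobr
  apply h.transfer ?_ ⟨h.OB1, h.OB1a⟩ h.OBR h.S2
  apply ObjEq.of_sameExcept hs
  · intro w hw
    simp only [Bits.wins, List.mem_cons, List.mem_nil_iff, or_false] at hw
    rcases hw with rfl | rfl | rfl | rfl <;> simp only [] <;> omega
  · intro w hw sp hsp
    simp only [Bits.wins, List.mem_cons, List.mem_nil_iff, or_false] at hw
    rcases hcl sp hsp with c | c | c | c | c | c <;>
      rcases hw with rfl | rfl | rfl | rfl <;> simp only [] <;> omega

/-- **The state after `setup_malloc(f, 56·mapping_count)` returned** (0x1159c7): the point for the ghost arena `A'` after the call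
(the old one on failure, one block more on success), MP1's field clause, and the result: NULL, or the block just allocated —
allocated since the snapshot `A7`. -/
def AfterAlloc (u₀ : State) (g : Ghost) (A7 : Arena) (w : State) : Prop :=
  ∃ A' : Arena × List Obj, Pt u₀ g Vorbis.L.start_decoder.cut237 A7 A' w ∧
    (1 ≤ stb_vorbis.mapping_count w.mem g.f ∧ stb_vorbis.mapping_count w.mem g.f ≤ 64) ∧
    (w.reg .rax = 0 ∨
      ((w.reg .rax).toNat ≠ 0 ∧
        Since A7 A'.1 ⟨(w.reg .rax).toNat, Off.sizeof.Mapping * (stb_vorbis.mapping_count w.mem g.f).toNat⟩))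

/-- **THE EXIT TO R8** (0x115f22, the head of loop 4095 with `i = 0`): from the point after `memset` returned, over the one store
`mov [rsp+0x10], eax` (the loop counter `i = 0` into the slot that held Z10): the frame constants of point 8 (without Z10), the
groups of SD.7 over the snapshot `A7`, MAPS(0) with the mapping table allocated since `A7`. -/
theorem r8_exit {u₀ : State} {g : Ghost} {pc : Word} {A7 : Arena} {A : Arena × List Obj} {s w : State}
    (hpt : Pt u₀ g pc A7 A s) (hs : Mem.SameExcept [⟨g.R + 0x10, g.R + 0x14⟩] s.mem w.mem)
    (hcnt : w.mem.u32 (g.R + 0x10) = 0)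
    (hrip : w.rip = pc_R8) (hrsp : w.reg .rsp = addr g.R) (hrbp : w.reg .rbp = addr g.f)
    (hcode : CodeOK u₀ w.mem) (hinv : abiInv w)
    (hmp1 : 1 ≤ stb_vorbis.mapping_count s.mem g.f ∧ stb_vorbis.mapping_count s.mem g.f ≤ 64)
    (hblk : Since A7 A.1 ⟨stb_vorbis.mapping s.mem g.f, Off.sizeof.Mapping * (stb_vorbis.mapping_count s.mem g.f).toNat⟩) :
    AtR8 u₀ g 0 w := by
  have hfr := hpt.frame
  have hmid := hpt.mid
  have hR := hfr.r_eq
  have hra := hfr.ra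
  simp only [depth, steady] at hR hra
  have hwh := obj_where hfr hpt.hand
  have hobr := hmid.bits.OBR
  simp only [Off.sizeof.stb_vorbis] at hobr
  have harena := hmid.arena
  have hone : ∀ {P : Span → Prop}, P ⟨g.R + 0x10, g.R + 0x14⟩ → ∀ sp, sp ∈ [(⟨g.R + 0x10, g.R + 0x14⟩ : Span)] → P sp := by
    intro P hP sp hsp
    have e : sp = ⟨g.R + 0x10, g.R + 0x14⟩ := List.mem_singleton.mp hsp
    rw [e]
    exact hP
  have hobjall : ∀ ws : Wins, WinsBelow ws 1808 → ObjEq ws s.mem g.f w.mem g.f := by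
    intro ws hws
    apply ObjEq.of_sameExcept hs
    · intro x hx
      have := hws x hx
      omega
    · intro x hx
      have := hws x hx
      apply hone
      simp only []
      omega
  have hkept : AllKept A.1.Blk s.mem w.mem := by
    apply harena.allKept_of_stack hs
    apply hone
    simp only []
    omega
  have hsh : Mem.EqOn 0xC00000 0xE00000 s.mem w.mem := by
    apply hs.eqOn
    apply hone
    simp only []
    omega
  have hidx : Mem.EqOn (g.R + 8) (g.R + 16) s.mem w.mem := by
    apply hs.eqOn
    apply hone
    simp only []
    omega
  have hmidslots : Mem.EqOn (g.R + 0x20) (g.RA + 8) s.mem w.mem := by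
    apply hs.eqOn
    apply hone
    simp only []
    omega
  have hlg : Mem.EqOn 0x120640 (0x120640 + 16) s.mem w.mem := by
    apply hs.eqOn
    apply hone
    simp only []
    omega
  have hsame : Mem.SameExcept (footprint g) g.e.mem w.mem := by
    apply hfr.same.trans
    apply hs.mono
    intro sp hsp a a1 a2
    have e : sp = ⟨g.R + 0x10, g.R + 0x14⟩ := List.mem_singleton.mp hsp
    subst e
    unfold footprint
    refine ⟨_, List.mem_cons_self, ?_, ?_⟩
    · simp only [depth] at a1 ⊢
      omega
    · simp only [] at a2 ⊢
      omega
  have hframe : Frame u₀ g pc_R8 A w :=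
    frame_move hfr hidx (hmidslots.mono (by omega) (Nat.le_refl _)) hlg hsame hrip hrsp hcode hinv
      (hfr.shadow.untouched hsh) hfr.offText (Arena.Extends.refl _)
  have hb : g.RA + 8 ≤ 2 ^ 64 := by omega
  have harena' : ArenaOK A.1 A.2 w.mem g.f := by
    apply harena.frame (by simp only [Off.sizeof.stb_vorbis]; omega)
    apply hs.eqOn
    apply hone
    simp only [voff]
    omega
  have hbits' : Bits (g.Blk A) g.len w.mem g.f :=
    (Vorbis.Spec.Reader.reader_of_window hmid.bits hs (by omega)).1
  have hc := hmid.consts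
  have hconsts : SDFrameConsts 8 w.mem g.R := by
    refine ⟨hc.aligned, ?_, ?_, ?_, ?_⟩
    · rw [hidx.u64 (g.R + 8) (by omega) (by omega) (by omega)]
      exact hc.shadowIdx
    · rw [hmidslots.u32 (g.R + 0x20) (by omega) (by omega) hb]
      exact hc.one20
    · intro h7
      exact absurd h7 (by omega)
    · intro _ _
      rw [hmidslots.u32 (g.R + 0x24) (by omega) (by omega) hb]
      exact hc.z24 (by omega) (by omega)
  have hmid' : Mid g 7 8 8 A7 A w.mem := by
    apply mid_move hmid (Nat.le_refl _) (hobjall _ ?_) ?_ hconsts ?_ (hmid.env.eqOn hsh) harena' hmid.noTemps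
      (Arena.Extends.refl _) hbits'
    · rw [winsAt78]
      decide
    · intro B hB
      exact hkept B (hB.mono hmid.extc)
    · intro _ _
      exact hmidslots.i32 (g.R + 0x28) (by omega) (by omega) hb
  have hemap : ObjEq MappingOK.wins s.mem g.f w.mem g.f := hobjall _ (by decide)
  have ecount : stb_vorbis.mapping_count w.mem g.f = stb_vorbis.mapping_count s.mem g.f := by
    simp only [vacc, voff]
    exact hemap.i32 464 (by decide)
  have emap : stb_vorbis.mapping w.mem g.f = stb_vorbis.mapping s.mem g.f := by
    simp only [vacc, voff]
    exact hemap.u64 472 (by decide)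
  refine ⟨A7, A.1, A, hframe, hpt.hand, hmid', hrbp, hcnt, ?_, ?_⟩
  · rw [ecount]
    omega
  · refine ⟨hmid.extc, Arena.Extends.refl _, Arena.Extends.refl _, ?_, ?_, ?_, ?_⟩
    · rw [ecount]
      omega
    · rw [ecount]
      exact hmp1
    · rw [ecount, emap]
      exact hblk
    · intro i' hi'
      exact absurd hi' (Nat.not_lt_zero _)

/-- `movsxd rdx, [f+0x1d0] ; imul rdx, rdx, 0x38` with `mapping_count = m ≤ 64`: the length argument of `memset`. -/
theorem rdx_val (m : Nat) (hm : m ≤ 64) :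
    (Word.ofBV (BitVec.signExtend 64 (BitVec.ofNat 32 m)) * 56).toNat = 56 * m := by
  rw [Vorbis.Spec.Segment.sx_ofNat32 m (by omega)]
  have e : addr m * 56 = addr (m * 56) := addr_mul_lit m 56
  rw [e, toNat_addr _ (by omega)]
  omega

/-- The dword spill slot `[R + k]` as the walker spells its address. -/
theorem r2_slot32 (g : Ghost) (mem : Mem) (k : Nat) (hk : k ≤ 1480) (hw : 1480 ≤ (g.e.reg .rsp).toNat) :
    mem.readLE (g.e.reg .rsp - UInt64.ofNat (1480 - k)) 4 = mem.u32 (g.R + k) := by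
  rw [← slot_addr (g.e.reg .rsp) k hk hw]
  rfl

/-- `mapping_count` from the dword the walker read back. -/
theorem mc_of_read (mem : Mem) (f m : Nat) (hm : m ≤ 64) (h : mem.readLE (addr f + 464) 4 = m) :
    stb_vorbis.mapping_count mem f = (m : Int) := by
  simp only [vacc, voff]
  rw [Mem.i32_def]
  have e : mem.u32 (f + 464) = m := by
    rw [← h, r2_fld]
    rfl
  rw [e]
  have hc := sint32_cases m
  omega

/-- `mapping` from the qword the walker read back. -/
theorem map_of_read (mem : Mem) (f p : Nat) (h : mem.readLE (addr f + 472) 8 = p) : stb_vorbis.mapping mem f = p := by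
  simp only [vacc, voff]
  rw [← h, r2_fld]
  rfl

end Vorbis.Spec.start_decoder_R2
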